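-- pv_equiv track=rewrite | github.com/lequanghung17/Maximum-Clique-Problem | nsc_prune.py | top_degree_subgraph
-- ===== SOURCE A (Python) =====
-- def top_degree_subgraph(n, edges, top_k=100):
--     degree = [0] * (n + 1)
--     for u, v in edges:
--         degree[u] += 1
--         degree[v] += 1
--     sorted_nodes = sorted(range(1, n+1), key=lambda i: degree[i], reverse=True)
--     selected = set(sorted_nodes[:top_k])
--     old2new = {old: idx+1 for idx, old in enumerate(sorted(selected))}
--     new_edges = [(old2new[u], old2new[v]) for u, v in edges if u in selected and v in selected]
--     return len(selected), new_edges, old2new, selected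
-- ===== SOURCE B (Python) =====
-- def top_degree_subgraph(n, edges, top_k=100):
--     degree = [0] * (n + 1)
--     for u, v in edges:
--         degree[u] += 1
--         degree[v] += 1
--     # counting sort by degree: bucket nodes 1..n by degree, drain high degree first
--     maxd = 2 * len(edges)
--     buckets = [[] for _ in range(maxd + 1)]
--     for i in range(1, n + 1):
--         buckets[degree[i]].append(i)
--     sorted_nodes = []
--     for d in range(maxd, -1, -1):
--         sorted_nodes += buckets[d]
--     selected = set(sorted_nodes[:top_k])
--     # relabel by one ascending scan instead of sorting the selected set
--     old2new = {}
--     new_count = 0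
--     for i in range(1, n + 1):
--         if i in selected:
--             new_count += 1
--             old2new[i] = new_count
--     new_edges = [(old2new[u], old2new[v]) for u, v in edges if u in selected and v in selected]
--     return len(selected), new_edges, old2new, selected
-- ===== Notes on version B (the rewrite author's own statement) =====
-- stated objective: alternative
-- what changed: B replaces the comparison sort (sorted by degree, reverse=True) by a counting/bucket sort drained from highest degree to lowest, and builds the relabel map by a single ascending scan over 1..n with a counter instead of sorting the selected set and enumerating it.
import Mathlib
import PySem

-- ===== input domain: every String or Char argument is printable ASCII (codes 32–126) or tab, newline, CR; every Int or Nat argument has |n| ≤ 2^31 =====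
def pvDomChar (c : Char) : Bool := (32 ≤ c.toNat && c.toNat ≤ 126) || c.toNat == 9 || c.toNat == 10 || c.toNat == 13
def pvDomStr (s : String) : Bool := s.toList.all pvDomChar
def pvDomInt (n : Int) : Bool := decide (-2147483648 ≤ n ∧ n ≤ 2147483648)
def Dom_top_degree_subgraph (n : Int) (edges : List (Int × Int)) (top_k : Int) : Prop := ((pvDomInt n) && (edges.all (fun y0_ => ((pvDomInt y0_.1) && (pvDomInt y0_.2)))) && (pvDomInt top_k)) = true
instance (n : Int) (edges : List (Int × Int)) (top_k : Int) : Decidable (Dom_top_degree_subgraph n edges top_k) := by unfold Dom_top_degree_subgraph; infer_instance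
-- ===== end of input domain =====

-- B is an alternative algorithm: a counting/bucket sort by degree (drained high→low) replaces
-- sorted(..., reverse=True), and the relabel map is built by one ascending scan instead of
-- sorting the selected set; same return value on all admitted inputs.

-- ===== PORT A =====
-- degree[p] += 1  (shared by both ports: the degree-counting lines of A and B are identical)
def pvIncr (xs : List Int) (p : Int) : List Int :=
  PySem.List.pySetD xs p (PySem.List.pyGetD xs p 0 + 1)

-- degree = [0]*(n+1); for u, v in edges: degree[u] += 1; degree[v] += 1
def tdsDegree (n : Int) (edges : List (Int × Int)) : List Int :=
  edges.foldl (fun deg e => pvIncr (pvIncr deg e.1) e.2) (PySem.List.pyRepeat [(0 : Int)] (n + 1))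

-- sorted_nodes = sorted(range(1, n+1), key=lambda i: degree[i], reverse=True)
-- (as CPython does, the key degree[i] is computed once per element — decorate, stable
--  reverse-sort, undecorate; for every i in 1..n the access is in range, so the pyGetD
--  default 0 is never used)
def tdsSortedA (n : Int) (edges : List (Int × Int)) : List Int :=
  let degree := tdsDegree n edges
  (PySem.List.sorted ((PySem.List.pyRange 1 (n + 1) 1).map
      (fun i => (i, PySem.List.pyGetD degree i 0))) (fun p => p.2) true).map (fun p => p.1)

-- selected = set(sorted_nodes[:top_k])
def tdsSelectedA (n : Int) (edges : List (Int × Int)) (top_k : Int) : PySem.Set Int :=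
  PySem.Set.ofList (PySem.List.slice (tdsSortedA n edges) none (some top_k))

-- old2new = {old: idx+1 for idx, old in enumerate(sorted(selected))}
def tdsOld2NewA (sel : PySem.Set Int) : PySem.Dict Int Int :=
  (PySem.List.enumerate (PySem.List.sorted sel (fun x => x) false) 0).foldl
    (fun d p => d.insert p.2 (p.1 + 1)) (PySem.Dict.mk [])

-- new_edges = [(old2new[u], old2new[v]) for u, v in edges if u in selected and v in selected]
-- (shared: this comprehension is identical in A and B; old2new[u] is present whenever u in selected,
--  so the getD default 0 is never used)
def tdsNewEdges (edges : List (Int × Int)) (sel : PySem.Set Int) (o2n : PySem.Dict Int Int) : List (Int × Int) :=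
  edges.foldl (fun acc e =>
    if PySem.Set.contains sel e.1 && PySem.Set.contains sel e.2 then
      acc ++ [(o2n.getD e.1 0, o2n.getD e.2 0)]
    else acc) []

def top_degree_subgraph (n : Int) (edges : List (Int × Int)) (top_k : Int) :
    Int × (List (Int × Int)) × (List (Int × Int)) × List Int :=
  let selected := tdsSelectedA n edges top_k
  let old2new := tdsOld2NewA selected
  ((selected.length : Int), tdsNewEdges edges selected old2new, old2new.items, selected)

-- ===== PORT B =====
-- maxd = 2 * len(edges)
def tdsMaxd (edges : List (Int × Int)) : Int := 2 * (edges.length : Int)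

-- buckets = [[] for _ in range(maxd+1)]; for i in range(1, n+1): buckets[degree[i]].append(i)
def tdsBuckets (n : Int) (edges : List (Int × Int)) : List (List Int) :=
  let degree := tdsDegree n edges
  (PySem.List.pyRange 1 (n + 1) 1).foldl
    (fun bs i => PySem.List.pySetD bs (PySem.List.pyGetD degree i 0)
      (PySem.List.pyGetD bs (PySem.List.pyGetD degree i 0) [] ++ [i]))
    ((PySem.List.pyRange 0 (tdsMaxd edges + 1) 1).map (fun _ => ([] : List Int)))

-- sorted_nodes = []; for d in range(maxd, -1, -1): sorted_nodes += buckets[d]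
def tdsSortedB (n : Int) (edges : List (Int × Int)) : List Int :=
  let buckets := tdsBuckets n edges
  (PySem.List.pyRange (tdsMaxd edges) (-1) (-1)).foldl
    (fun acc d => acc ++ PySem.List.pyGetD buckets d []) []

-- selected = set(sorted_nodes[:top_k])
def tdsSelectedB (n : Int) (edges : List (Int × Int)) (top_k : Int) : PySem.Set Int :=
  PySem.Set.ofList (PySem.List.slice (tdsSortedB n edges) none (some top_k))

-- old2new = {}; new_count = 0; for i in range(1, n+1): if i in selected: new_count += 1; old2new[i] = new_count
def tdsOld2NewB (n : Int) (sel : PySem.Set Int) : PySem.Dict Int Int :=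
  ((PySem.List.pyRange 1 (n + 1) 1).foldl
    (fun s i => if PySem.Set.contains sel i
                then (s.1.insert i (s.2 + 1), s.2 + 1) else s)
    (PySem.Dict.mk [], (0 : Int))).1

def top_degree_subgraph_alt (n : Int) (edges : List (Int × Int)) (top_k : Int) :
    Int × (List (Int × Int)) × (List (Int × Int)) × List Int :=
  let selected := tdsSelectedB n edges top_k
  let old2new := tdsOld2NewB n selected
  ((selected.length : Int), tdsNewEdges edges selected old2new, old2new.items, selected)

-- ===== PRECONDITION & SPEC =====
-- Pre_ excludes exactly the inputs on which A raises IndexError: an edge endpoint outside the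
-- valid (possibly negative) index range of the degree list of length n+1.
def Pre_top_degree_subgraph (n : Int) (edges : List (Int × Int)) (top_k : Int) : Prop :=
  ∀ e ∈ edges, -(n + 1) ≤ e.1 ∧ e.1 ≤ n ∧ -(n + 1) ≤ e.2 ∧ e.2 ≤ n

instance (n : Int) (edges : List (Int × Int)) (top_k : Int) : Decidable (Pre_top_degree_subgraph n edges top_k) := by
  unfold Pre_top_degree_subgraph; infer_instance

def pvWitness_top_degree_subgraph : Int × (List (Int × Int)) × Int := (3, [(1, 2), (2, 3)], 2)

def Spec_top_degree_subgraph (n : Int) (edges : List (Int × Int)) (top_k : Int)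
    (out : Int × (List (Int × Int)) × (List (Int × Int)) × List Int) : Prop :=
  out = top_degree_subgraph_alt n edges top_k

instance (n : Int) (edges : List (Int × Int)) (top_k : Int)
    (out : Int × (List (Int × Int)) × (List (Int × Int)) × List Int) :
    Decidable (Spec_top_degree_subgraph n edges top_k out) := by
  unfold Spec_top_degree_subgraph; infer_instance

-- ===== CLAIM (what is proved, stated in full; the proofs are below) =====
def Claim_equal_top_degree_subgraph : Prop :=
  ∀ (n : Int) (edges : List (Int × Int)) (top_k : Int),
    Dom_top_degree_subgraph n edges top_k → Pre_top_degree_subgraph n edges top_k →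
    Spec_top_degree_subgraph n edges top_k (top_degree_subgraph n edges top_k)

-- ===== LEMMAS AND PROOFS =====

-- proof-only abbreviation for the key function degree[i]
def tdsKey (n : Int) (edges : List (Int × Int)) (i : Int) : Int :=
  PySem.List.pyGetD (tdsDegree n edges) i 0

lemma pyIdx?_some_lt {n : Nat} {i : Int} {m : Nat} (h : PySem.List.pyIdx? n i = some m) : m < n := by
  unfold PySem.List.pyIdx? at h
  split_ifs at h
  all_goals simp_all
  all_goals omega

lemma mem_pySetD {α : Type} {xs : List α} {i : Int} {v x : α}
    (h : x ∈ PySem.List.pySetD xs i v) : x ∈ xs ∨ x = v := by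
  unfold PySem.List.pySetD PySem.List.pySet? at h
  cases hidx : PySem.List.pyIdx? xs.length i with
  | none => simp [hidx] at h; exact Or.inl h
  | some m =>
    simp [hidx] at h
    exact List.mem_or_eq_of_mem_set h

lemma pyGetD_cases {α : Type} (xs : List α) (i : Int) (d : α) :
    PySem.List.pyGetD xs i d = d ∨ PySem.List.pyGetD xs i d ∈ xs := by
  unfold PySem.List.pyGetD PySem.List.pyGet?
  cases hidx : PySem.List.pyIdx? xs.length i with
  | none => simp
  | some m =>
    have hm : m < xs.length := pyIdx?_some_lt hidx
    simp [hm]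

lemma pvIncr_bound {xs : List Int} {c : Int} (hc : 0 ≤ c)
    (h : ∀ x ∈ xs, 0 ≤ x ∧ x ≤ c) (p : Int) :
    ∀ x ∈ pvIncr xs p, 0 ≤ x ∧ x ≤ c + 1 := by
  intro x hx
  rcases mem_pySetD hx with h' | h'
  · have := h x h'; omega
  · subst h'
    rcases pyGetD_cases xs p 0 with h'' | h''
    · rw [h'']; omega
    · have := h _ h''; omega

lemma foldl_pvIncr_bound :
    ∀ (es : List (Int × Int)) (xs : List Int) (c : Int), 0 ≤ c →
      (∀ x ∈ xs, 0 ≤ x ∧ x ≤ c) →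
      ∀ x ∈ es.foldl (fun d e => pvIncr (pvIncr d e.1) e.2) xs, 0 ≤ x ∧ x ≤ c + 2 * es.length := by
  intro es
  induction es with
  | nil => intro xs c hc h x hx; simpa using h x hx
  | cons e t ih =>
    intro xs c hc h x hx
    simp only [List.foldl_cons] at hx
    have h1 := pvIncr_bound hc h e.1
    have h2 := pvIncr_bound (by omega) h1 e.2
    have := ih _ (c + 1 + 1) (by omega) h2 x hx
    have : 0 ≤ x ∧ x ≤ c + 1 + 1 + 2 * t.length := this
    simp only [List.length_cons]
    push_cast
    omega

lemma tdsKey_bound (n : Int) (edges : List (Int × Int)) (i : Int) :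
    0 ≤ tdsKey n edges i ∧ tdsKey n edges i ≤ 2 * (edges.length : Int) := by
  unfold tdsKey tdsDegree
  rcases pyGetD_cases (edges.foldl (fun deg e => pvIncr (pvIncr deg e.1) e.2)
      (PySem.List.pyRepeat [(0 : Int)] (n + 1))) i 0 with h | h
  · rw [h]; constructor <;> positivity
  · 
    have h0 : ∀ x ∈ PySem.List.pyRepeat [(0 : Int)] (n + 1), 0 ≤ x ∧ x ≤ (0 : Int) := by
      intro x hx
      rw [PySem.List.pyRepeat_singleton] at hx
      simp [List.eq_of_mem_replicate hx]
    have := foldl_pvIncr_bound edges _ 0 le_rfl h0 _ h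
    omega

lemma insertBy_cons {α : Type} (bp : α → α → Bool) (x a : α) (t : List α) :
    PySem.List.insertBy bp x (a :: t) =
      if bp x a then x :: a :: t else a :: PySem.List.insertBy bp x t := rfl

lemma insertBy_append_left {α : Type} (bp : α → α → Bool) (x : α) (l1 l2 : List α)
    (h : ∀ y ∈ l1, bp x y = false) :
    PySem.List.insertBy bp x (l1 ++ l2) = l1 ++ PySem.List.insertBy bp x l2 := by
  induction l1 with
  | nil => simp
  | cons a t ih =>
    have ha : bp x a = false := h a (by simp)
    rw [List.cons_append, insertBy_cons, ha]
    simp only [Bool.false_eq_true, if_false]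
    rw [ih (fun y hy => h y (by simp [hy]))]
    simp

lemma insertBy_all_before {α : Type} (bp : α → α → Bool) (x : α) (l : List α)
    (h : ∀ y ∈ l, bp x y = true) :
    PySem.List.insertBy bp x l = x :: l := by
  cases l with
  | nil => rfl
  | cons a t => rw [insertBy_cons, h a (by simp)]; simp

lemma mem_flat_filter {k : Int → Int} {xs : List Int} {ds : List Int} {y : Int}
    (hy : y ∈ ds.flatMap (fun d => xs.filter (fun i => k i == d))) :
    ∃ d ∈ ds, k y = d := by
  rcases List.mem_flatMap.1 hy with ⟨d, hd, hyd⟩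
  exact ⟨d, hd, by simpa using (List.mem_filter.1 hyd).2⟩

lemma sortRev_eq_buckets (k : Int → Int) (maxd : Int) (_hmd : 0 ≤ maxd) :
    ∀ xs : List Int, (∀ i ∈ xs, 0 ≤ k i ∧ k i ≤ maxd) →
      PySem.List.sorted xs k true =
        (PySem.List.pyRange maxd (-1) (-1)).flatMap (fun d => xs.filter (fun i => k i == d)) := by
  intro xs
  induction xs using List.reverseRecOn with
  | nil =>
    intro _
    rw [(PySem.List.sorted_eq_nil_iff [] k true).mpr rfl]
    simp
  | append_singleton xs x ih =>
    intro hb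
    have hxs : ∀ i ∈ xs, 0 ≤ k i ∧ k i ≤ maxd := fun i hi => hb i (by simp [hi])
    have hx := hb x (by simp)
    rw [PySem.List.sorted_rev_eq_foldl_insertBy, List.foldl_append]
    simp only [List.foldl_cons, List.foldl_nil]
    rw [← PySem.List.sorted_rev_eq_foldl_insertBy, ih hxs]
    have hrange : PySem.List.pyRange maxd (-1) (-1) =
        (PySem.List.pyRange (k x) (maxd + 1)).reverse ++ (PySem.List.pyRange 0 (k x)).reverse := by
      have h0 : PySem.List.pyRange maxd (-1) (-1) = (PySem.List.pyRange 0 (maxd + 1)).reverse := by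
        have h1 := PySem.List.pyRange_neg_one_eq_reverse maxd (-1)
        norm_num at h1
        exact h1
      rw [h0, PySem.List.pyRange_one_append 0 (k x) (maxd + 1) hx.1 (by omega),
        List.reverse_append]
    have hsplit : PySem.List.pyRange (k x) (maxd + 1) =
        k x :: PySem.List.pyRange (k x + 1) (maxd + 1) :=
      PySem.List.pyRange_one_cons (by omega)
    set T := PySem.List.pyRange (k x + 1) (maxd + 1) with hT
    set Lo := PySem.List.pyRange 0 (k x) with hLo
    have hrev : (PySem.List.pyRange (k x) (maxd + 1)).reverse = T.reverse ++ [k x] := by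
      rw [hsplit]; simp
    rw [hrange, hrev]
    -- RHS blocks for xs ++ [x]
    have hF' : ∀ d : Int, (xs ++ [x]).filter (fun i => k i == d) =
        xs.filter (fun i => k i == d) ++ (if k x == d then [x] else []) := by
      intro d
      rw [List.filter_append]
      cases hkd : k x == d <;> simp [hkd]
    have hhi : ∀ d ∈ T.reverse, (xs ++ [x]).filter (fun i => k i == d) =
        xs.filter (fun i => k i == d) := by
      intro d hd
      have : k x + 1 ≤ d := ((PySem.List.mem_pyRange_one).1 (List.mem_reverse.1 hd)).1
      rw [hF', if_neg (by simp; omega)]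
      simp
    have hlo : ∀ d ∈ Lo.reverse, (xs ++ [x]).filter (fun i => k i == d) =
        xs.filter (fun i => k i == d) := by
      intro d hd
      have : d < k x := ((PySem.List.mem_pyRange_one).1 (List.mem_reverse.1 hd)).2
      rw [hF', if_neg (by simp; omega)]
      simp
    rw [List.flatMap_append, List.flatMap_append, List.flatMap_append, List.flatMap_append]
    rw [List.flatMap_congr hhi, List.flatMap_congr hlo]
    have hsing : List.flatMap (fun d => (xs ++ [x]).filter (fun i => k i == d)) [k x] =
        xs.filter (fun i => k i == k x) ++ [x] := by
      simp only [List.flatMap_cons, List.flatMap_nil, List.append_nil]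
      rw [hF', if_pos (by simp)]
    have hsingF : List.flatMap (fun d => xs.filter (fun i => k i == d)) [k x] =
        xs.filter (fun i => k i == k x) := by
      simp
    rw [hsing, hsingF]
    -- LHS: insert x into P1 ++ FK ++ P2
    set P1 := T.reverse.flatMap (fun d => xs.filter (fun i => k i == d)) with hP1
    set FK := xs.filter (fun i => k i == k x) with hFK
    set P2 := Lo.reverse.flatMap (fun d => xs.filter (fun i => k i == d)) with hP2
    have hkeyhi : ∀ y ∈ P1 ++ FK, (fun a b => decide (k b < k a)) x y = false := by
      intro y hy
      rcases List.mem_append.1 hy with hy | hy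
      · rcases mem_flat_filter hy with ⟨d, hd, hkd⟩
        have : k x + 1 ≤ d := ((PySem.List.mem_pyRange_one).1 (List.mem_reverse.1 hd)).1
        simp only [decide_eq_false_iff_not, not_lt]
        omega
      · have : k y = k x := by simpa using (List.mem_filter.1 hy).2
        simp only [decide_eq_false_iff_not, not_lt]
        omega
    have hkeylo : ∀ y ∈ P2, (fun a b => decide (k b < k a)) x y = true := by
      intro y hy
      rcases mem_flat_filter hy with ⟨d, hd, hkd⟩
      have : d < k x := ((PySem.List.mem_pyRange_one).1 (List.mem_reverse.1 hd)).2
      simp only [decide_eq_true_eq]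
      omega
    calc PySem.List.insertBy (fun a b => decide (k b < k a)) x (P1 ++ FK ++ P2)
        = (P1 ++ FK) ++ PySem.List.insertBy (fun a b => decide (k b < k a)) x P2 :=
          insertBy_append_left _ x (P1 ++ FK) P2 hkeyhi
      _ = (P1 ++ FK) ++ (x :: P2) := by rw [insertBy_all_before _ x P2 hkeylo]
      _ = P1 ++ (FK ++ [x]) ++ P2 := by simp


lemma fill_step (k : Int → Int) (bs : List (List Int)) (i : Int)
    (h0 : 0 ≤ k i) (h1 : k i < (bs.length : Int)) :
    PySem.List.pySetD bs (k i) (PySem.List.pyGetD bs (k i) [] ++ [i]) =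
      bs.set (k i).toNat (bs.getD (k i).toNat [] ++ [i]) := by
  have hm : (k i).toNat < bs.length := by omega
  rw [PySem.List.pySetD_of_nonneg _ _ h0,
    PySem.List.pyGetD_eq_getElem _ _ h0 (by exact_mod_cast h1),
    List.getD_eq_getElem bs [] hm]

lemma fill_length (k : Int → Int) :
    ∀ (xs : List Int) (bs : List (List Int)),
      (∀ i ∈ xs, 0 ≤ k i ∧ k i < (bs.length : Int)) →
      (xs.foldl (fun bs i => PySem.List.pySetD bs (k i)
          (PySem.List.pyGetD bs (k i) [] ++ [i])) bs).length = bs.length := by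
  intro xs
  induction xs with
  | nil => intro bs _; rfl
  | cons i t ih =>
    intro bs h
    have hi := h i (by simp)
    simp only [List.foldl_cons]
    rw [fill_step k bs i hi.1 hi.2]
    rw [ih _ (fun j hj => by simpa [List.length_set] using h j (by simp [hj]))]
    exact List.length_set ..

lemma fill_getD (k : Int → Int) :
    ∀ (xs : List Int) (bs : List (List Int)),
      (∀ i ∈ xs, 0 ≤ k i ∧ k i < (bs.length : Int)) →
      ∀ (d : Nat), d < bs.length →
        (xs.foldl (fun bs i => PySem.List.pySetD bs (k i)
            (PySem.List.pyGetD bs (k i) [] ++ [i])) bs).getD d [] =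
          bs.getD d [] ++ xs.filter (fun i => k i == (d : Int)) := by
  intro xs
  induction xs with
  | nil => intro bs _ d _; simp
  | cons i t ih =>
    intro bs h d hd
    have hi := h i (by simp)
    have hm : (k i).toNat < bs.length := by omega
    simp only [List.foldl_cons]
    rw [fill_step k bs i hi.1 hi.2]
    rw [ih _ (fun j hj => by simpa [List.length_set] using h j (by simp [hj])) d
      (by simpa [List.length_set] using hd)]
    by_cases hdm : d = (k i).toNat
    · have hki : (k i == (d : Int)) = true := by simp; omega
      subst hdm
      rw [List.getD_eq_getElem _ _ (by simpa [List.length_set] using hd),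
        List.getElem_set_self, List.filter_cons, hki]
      simp
    · have hki : (k i == (d : Int)) = false := by simp; omega
      rw [List.filter_cons, hki]
      congr 1
      rw [List.getD_eq_getElem _ _ (by simpa [List.length_set] using hd),
        List.getElem_set_ne (by omega), List.getD_eq_getElem bs [] hd]

lemma tdsSortedB_eq (n : Int) (edges : List (Int × Int)) :
    tdsSortedB n edges =
      (PySem.List.pyRange (tdsMaxd edges) (-1) (-1)).flatMap
        (fun d => (PySem.List.pyRange 1 (n + 1) 1).filter (fun i => tdsKey n edges i == d)) := by
  have hmd : 0 ≤ tdsMaxd edges := by unfold tdsMaxd; positivity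
  set bs0 : List (List Int) := (PySem.List.pyRange 0 (tdsMaxd edges + 1) 1).map (fun _ => []) with hbs0
  have hlen0 : (bs0.length : Int) = tdsMaxd edges + 1 := by
    rw [hbs0, List.length_map, PySem.List.length_pyRange_one]
    omega
  have hyp : ∀ i ∈ PySem.List.pyRange 1 (n + 1) 1,
      0 ≤ tdsKey n edges i ∧ tdsKey n edges i < (bs0.length : Int) := by
    intro i _
    have h1 := tdsKey_bound n edges i
    rw [hlen0]
    unfold tdsMaxd
    exact ⟨h1.1, by omega⟩
  have hfill : tdsBuckets n edges = (PySem.List.pyRange 1 (n + 1) 1).foldl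
      (fun bs i => PySem.List.pySetD bs (tdsKey n edges i)
        (PySem.List.pyGetD bs (tdsKey n edges i) [] ++ [i])) bs0 := rfl
  have hlen : (tdsBuckets n edges).length = bs0.length := by
    rw [hfill]; exact fill_length (tdsKey n edges) _ bs0 hyp
  have hmem : ∀ d : Int, d ∈ PySem.List.pyRange (tdsMaxd edges) (-1) (-1) →
      0 ≤ d ∧ d ≤ tdsMaxd edges := by
    intro d hd
    rw [PySem.List.pyRange_neg_one_eq_reverse, List.mem_reverse, PySem.List.mem_pyRange_one] at hd
    omega
  have hbody : ∀ (acc : List Int) (d : Int), d ∈ PySem.List.pyRange (tdsMaxd edges) (-1) (-1) →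
      acc ++ PySem.List.pyGetD (tdsBuckets n edges) d [] =
      acc ++ (PySem.List.pyRange 1 (n + 1) 1).filter (fun i => tdsKey n edges i == d) := by
    intro acc d hd
    have hdb := hmem d hd
    have hdl : d < ((tdsBuckets n edges).length : Int) := by rw [hlen]; omega
    congr 1
    rw [PySem.List.pyGetD_eq_getElem _ _ hdb.1 (by exact_mod_cast hdl)]
    rw [show (tdsBuckets n edges)[d.toNat]'(by omega) =
        (tdsBuckets n edges).getD d.toNat [] from
      (List.getD_eq_getElem _ [] (by omega)).symm]
    rw [hfill, fill_getD (tdsKey n edges) _ bs0 hyp d.toNat (by omega)]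
    have hinit : bs0.getD d.toNat [] = [] := by
      rcases lt_or_ge d.toNat bs0.length with h | h
      · have hmem' : bs0[d.toNat]'h ∈ bs0 := List.getElem_mem h
        have hall : ∀ x ∈ bs0, x = [] := by
          intro x hx
          rw [hbs0] at hx
          rcases List.mem_map.1 hx with ⟨a, _, ha⟩
          exact ha.symm
        rw [List.getD_eq_getElem _ _ h]
        exact hall _ hmem'
      · rw [List.getD_eq_default _ _ h]
    rw [hinit, List.nil_append, Int.toNat_of_nonneg hdb.1]
  have hSB : tdsSortedB n edges = (PySem.List.pyRange (tdsMaxd edges) (-1) (-1)).foldl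
      (fun acc d => acc ++ PySem.List.pyGetD (tdsBuckets n edges) d []) [] := rfl
  rw [hSB]
  rw [PySem.List.foldl_congr_mem _ _
    (fun acc d => acc ++ (PySem.List.pyRange 1 (n + 1) 1).filter (fun i => tdsKey n edges i == d))
    _ hbody]
  rw [PySem.List.foldl_append_eq_flatMap]
  simp

lemma insertBy_map_fst (k : Int → Int) (x : Int) :
    ∀ (L : List (Int × Int)), (∀ p ∈ L, p.2 = k p.1) →
      (PySem.List.insertBy (fun a b => decide (b.2 < a.2)) (x, k x) L).map Prod.fst =
        PySem.List.insertBy (fun a b => decide (k b < k a)) x (L.map Prod.fst) := by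
  intro L
  induction L with
  | nil => intro _; rfl
  | cons q t ih =>
    intro h
    have hq : q.2 = k q.1 := h q (by simp)
    rw [insertBy_cons]
    simp only [List.map_cons]
    rw [insertBy_cons]
    by_cases hlt : k q.1 < k x
    · rw [if_pos (by simp [hq]; omega), if_pos (by simp; omega)]
      simp
    · rw [if_neg (by simp [hq]; omega), if_neg (by simp; omega)]
      simp only [List.map_cons]
      rw [ih (fun p hp => h p (by simp [hp]))]

lemma sorted_decorate (k : Int → Int) :
    ∀ xs : List Int,
      (PySem.List.sorted (xs.map (fun i => (i, k i))) (fun p => p.2) true).map (fun p => p.1) =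
        PySem.List.sorted xs k true := by
  intro xs
  induction xs using List.reverseRecOn with
  | nil => rfl
  | append_singleton xs x ih =>
    rw [PySem.List.sorted_rev_eq_foldl_insertBy, PySem.List.sorted_rev_eq_foldl_insertBy,
      List.map_append, List.foldl_append, List.foldl_append]
    simp only [List.map_cons, List.map_nil, List.foldl_cons, List.foldl_nil]
    rw [← PySem.List.sorted_rev_eq_foldl_insertBy, ← PySem.List.sorted_rev_eq_foldl_insertBy]
    have hinv : ∀ p ∈ PySem.List.sorted (xs.map (fun i => (i, k i))) (fun p => p.2) true,
        p.2 = k p.1 := by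
      intro p hp
      rw [PySem.List.mem_sorted] at hp
      rcases List.mem_map.1 hp with ⟨a, _, ha⟩
      rw [← ha]
    have := insertBy_map_fst k x _ hinv
    rw [show (fun p : Int × Int => p.1) = Prod.fst from rfl, this, ih]

lemma sortedB_eq_sortedA (n : Int) (edges : List (Int × Int)) :
    tdsSortedB n edges = tdsSortedA n edges := by
  have hA : tdsSortedA n edges =
      (PySem.List.sorted ((PySem.List.pyRange 1 (n + 1) 1).map
        (fun i => (i, tdsKey n edges i))) (fun p => p.2) true).map (fun p => p.1) := rfl
  rw [tdsSortedB_eq, hA, sorted_decorate (tdsKey n edges)]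
  rw [sortRev_eq_buckets (tdsKey n edges) (tdsMaxd edges) (by unfold tdsMaxd; positivity)
      _ (fun i _ => by simpa [tdsMaxd] using tdsKey_bound n edges i)]

lemma selectedB_eq_selectedA (n : Int) (edges : List (Int × Int)) (top_k : Int) :
    tdsSelectedB n edges top_k = tdsSelectedA n edges top_k := by
  unfold tdsSelectedB tdsSelectedA
  rw [sortedB_eq_sortedA]

lemma contains_eq_decide_mem (s : PySem.Set Int) (x : Int) :
    PySem.Set.contains s x = decide (x ∈ s) := by
  simp [PySem.Set.contains]

lemma sortedSel_eq (n : Int) (S : PySem.Set Int)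
    (hsub : ∀ i ∈ S, i ∈ PySem.List.pyRange 1 (n + 1) 1) (hnd : List.Nodup S) :
    PySem.List.sorted S (fun x => x) false =
      (PySem.List.pyRange 1 (n + 1) 1).filter (fun i => PySem.Set.contains S i) := by
  apply PySem.List.sorted_eq_of_perm_of_pairwise_lt
  · rw [List.perm_ext_iff_of_nodup (List.Nodup.filter _ (PySem.List.nodup_pyRange_one 1 (n + 1))) hnd]
    intro a
    rw [List.mem_filter]
    constructor
    · intro h
      have := h.2
      rw [contains_eq_decide_mem] at this
      simpa using this
    · intro h
      refine ⟨hsub a h, ?_⟩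
      rw [contains_eq_decide_mem]
      simpa using h
  · exact List.Pairwise.filter _ (PySem.List.pairwise_lt_pyRange_one 1 (n + 1))

lemma o2n_loop (S : PySem.Set Int) :
    ∀ (zs : List Int) (d : PySem.Dict Int Int) (c : Int),
      zs.foldl (fun s i => if PySem.Set.contains S i then (s.1.insert i (s.2 + 1), s.2 + 1) else s) (d, c) =
        ((PySem.List.enumerate (zs.filter (fun i => PySem.Set.contains S i)) c).foldl
            (fun d p => d.insert p.2 (p.1 + 1)) d,
         c + ((zs.filter (fun i => PySem.Set.contains S i)).length : Int)) := by
  intro zs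
  induction zs with
  | nil => intro d c; simp [PySem.List.enumerate_nil]
  | cons i t ih =>
    intro d c
    simp only [List.foldl_cons]
    by_cases hc : PySem.Set.contains S i = true
    · rw [if_pos hc, ih]
      rw [List.filter_cons, if_pos hc, PySem.List.enumerate_cons]
      simp only [List.foldl_cons, List.length_cons]
      refine Prod.ext rfl ?_
      push_cast
      ring
    · rw [if_neg hc, ih]
      rw [List.filter_cons, if_neg hc]

lemma old2newB_eq_old2newA (n : Int) (edges : List (Int × Int)) (top_k : Int) :
    tdsOld2NewB n (tdsSelectedA n edges top_k) = tdsOld2NewA (tdsSelectedA n edges top_k) := by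
  unfold tdsOld2NewB tdsOld2NewA
  have hsub : ∀ i ∈ tdsSelectedA n edges top_k, i ∈ PySem.List.pyRange 1 (n + 1) 1 := by
    intro i hi
    unfold tdsSelectedA at hi
    rw [PySem.Set.mem_ofList] at hi
    have h2 := PySem.List.mem_of_mem_slice _ _ _ hi
    have hA : tdsSortedA n edges =
        (PySem.List.sorted ((PySem.List.pyRange 1 (n + 1) 1).map
          (fun i => (i, tdsKey n edges i))) (fun p => p.2) true).map (fun p => p.1) := rfl
    rw [hA, sorted_decorate (tdsKey n edges), PySem.List.mem_sorted] at h2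
    exact h2
  have hnd : List.Nodup (tdsSelectedA n edges top_k) := PySem.Set.nodup_ofList _
  rw [o2n_loop, sortedSel_eq n _ hsub hnd]

-- ===== VERDICT (by name: the statement is the Claim_ definition above) =====
theorem top_degree_subgraph_spec : Claim_equal_top_degree_subgraph := by
  intro n edges top_k _ _
  show top_degree_subgraph n edges top_k = top_degree_subgraph_alt n edges top_k
  have hA : top_degree_subgraph n edges top_k =
      (((tdsSelectedA n edges top_k).length : Int),
       tdsNewEdges edges (tdsSelectedA n edges top_k) (tdsOld2NewA (tdsSelectedA n edges top_k)),
       (tdsOld2NewA (tdsSelectedA n edges top_k)).items,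
       tdsSelectedA n edges top_k) := rfl
  have hB : top_degree_subgraph_alt n edges top_k =
      (((tdsSelectedB n edges top_k).length : Int),
       tdsNewEdges edges (tdsSelectedB n edges top_k) (tdsOld2NewB n (tdsSelectedB n edges top_k)),
       (tdsOld2NewB n (tdsSelectedB n edges top_k)).items,
       tdsSelectedB n edges top_k) := rfl
  rw [hA, hB, selectedB_eq_selectedA, old2newB_eq_old2newA]
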